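-- pv_equiv track=rewrite | github.com/pmartin1915/ecg-classification-system | app/utils/comprehensive_mapper.py | get_primary_condition
-- ===== SOURCE A (Python) =====
-- from typing import Dict, List, Set
--
-- def get_primary_condition(conditions: List[str]) -> str:
--     """Get the primary (most critical) condition from a list"""
--     # Priority order (most critical first)
--     priority_order = [
--         'AMI', 'IMI', 'LMI', 'PMI',     # Myocardial Infarction (highest priority)
--         'VTAC', 'AVB3',                  # Life-threatening arrhythmias
--         'AFIB', 'AFLT', 'AVB2',         # Serious arrhythmias
--         'PVC', 'PAC', 'SVTAC',          # Other arrhythmias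
--         'LBBB', 'WPW',                  # Serious conduction disorders
--         'RBBB', 'AVB1', 'LAFB', 'LPFB', 'IVCD',  # Other conduction disorders
--         'LVH', 'RVH', 'LAE', 'RAE',     # Structural abnormalities
--         'ISCH', 'LNGQT',                # Ischemia and repolarization
--         'STTC', 'PACE', 'DIG', 'LOWT',  # Other findings
--         'NORM'                          # Normal (lowest priority)
--     ]
--
--     for priority_condition in priority_order:
--         if priority_condition in conditions:
--             return priority_condition
--
--     return conditions[0] if conditions else 'NORM'
-- ===== SOURCE B (Python) =====
-- def get_primary_condition(conditions):
--     """Get the primary (most critical) condition from a list"""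
--     priority_order = [
--         'AMI', 'IMI', 'LMI', 'PMI',
--         'VTAC', 'AVB3',
--         'AFIB', 'AFLT', 'AVB2',
--         'PVC', 'PAC', 'SVTAC',
--         'LBBB', 'WPW',
--         'RBBB', 'AVB1', 'LAFB', 'LPFB', 'IVCD',
--         'LVH', 'RVH', 'LAE', 'RAE',
--         'ISCH', 'LNGQT',
--         'STTC', 'PACE', 'DIG', 'LOWT',
--         'NORM'
--     ]
--     rank = {code: i for i, code in enumerate(priority_order)}
--     best = None
--     best_rank = None
--     for c in conditions:
--         r = rank.get(c)
--         if r is not None and (best_rank is None or r < best_rank):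
--             best, best_rank = c, r
--     if best is not None:
--         return best
--     return conditions[0] if conditions else 'NORM'
-- ===== Notes on version B (the rewrite author's own statement) =====
-- stated objective: faster
-- what changed: Instead of scanning the fixed priority list and testing membership of each code in `conditions`, B precomputes a code->index rank dictionary once and makes a single pass over `conditions`, keeping the code with the smallest rank.
import Mathlib
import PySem

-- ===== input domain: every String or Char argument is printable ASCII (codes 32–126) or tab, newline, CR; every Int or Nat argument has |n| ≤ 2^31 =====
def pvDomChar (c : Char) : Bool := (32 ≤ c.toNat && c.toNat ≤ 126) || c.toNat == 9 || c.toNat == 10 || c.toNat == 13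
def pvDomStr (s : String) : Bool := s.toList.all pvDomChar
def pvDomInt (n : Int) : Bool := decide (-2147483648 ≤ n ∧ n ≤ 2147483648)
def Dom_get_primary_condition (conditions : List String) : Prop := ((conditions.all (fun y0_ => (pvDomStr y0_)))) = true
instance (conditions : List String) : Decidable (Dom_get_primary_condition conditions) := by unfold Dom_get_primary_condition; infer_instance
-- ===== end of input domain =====

-- B replaces A's scan of the fixed priority list (membership test per priority code) by a
-- precomputed rank dictionary and a single pass over `conditions` keeping the best-ranked code
-- (objective: alternative / faster on long inputs; return value proved equal on all inputs).


-- the priority table both Pythons write out literally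
def priorityList : List String :=
  ["AMI", "IMI", "LMI", "PMI",
   "VTAC", "AVB3",
   "AFIB", "AFLT", "AVB2",
   "PVC", "PAC", "SVTAC",
   "LBBB", "WPW",
   "RBBB", "AVB1", "LAFB", "LPFB", "IVCD",
   "LVH", "RVH", "LAE", "RAE",
   "ISCH", "LNGQT",
   "STTC", "PACE", "DIG", "LOWT",
   "NORM"]

-- ===== PORT A =====
-- `for p in priority_order: if p in conditions: return p` = first element of the priority list
-- that is a member of `conditions`
def get_primary_condition (conditions : List String) : String :=
  match priorityList.find? (fun p => conditions.contains p) with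
  | some p => p
  | none =>
    match conditions with
    | [] => "NORM"
    | c :: _ => c

-- ===== PORT B =====
-- rank = {code: i for i, code in enumerate(priority_order)}
def rankDict : PySem.Dict String Int :=
  (PySem.List.enumerate priorityList 0).foldl (fun d p => d.insert p.2 p.1) PySem.Dict.empty

-- one iteration of B's loop: state = (best, best_rank) bundled, None when nothing found yet
def bStep (s : Option (String × Int)) (c : String) : Option (String × Int) :=
  match rankDict.get? c with
  | none => s
  | some r =>
    match s with
    | none => some (c, r)
    | some (_, br) => if r < br then some (c, r) else s

def get_primary_condition_alt (conditions : List String) : String :=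
  match conditions.foldl bStep none with
  | some (b, _) => b
  | none =>
    match conditions with
    | [] => "NORM"
    | c :: _ => c

-- ===== PRECONDITION & SPEC =====
def Spec_get_primary_condition (conditions : List String) (out : String) : Prop := out = get_primary_condition_alt conditions
instance (conditions : List String) (out : String) : Decidable (Spec_get_primary_condition conditions out) := by unfold Spec_get_primary_condition; infer_instance

-- ===== CLAIM (what is proved, stated in full; the proofs are below) =====
def Claim_equal_get_primary_condition : Prop := ∀ (conditions : List String), Dom_get_primary_condition conditions → Spec_get_primary_condition conditions (get_primary_condition conditions)

-- ===== LEMMAS AND PROOFS =====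

-- rank of a code in a priority list: index of its first occurrence, as Python's dict stores it
def rk : List String → String → Option Int
  | [], _ => none
  | p :: t, c => if c = p then some 0 else (rk t c).map (· + 1)

lemma rk_nonneg : ∀ (P : List String) (c : String) (i : Int), rk P c = some i → 0 ≤ i := by
  intro P
  induction P with
  | nil => intro c i h; simp [rk] at h
  | cons a t ih =>
    intro c i h
    by_cases hc : c = a
    · simp [rk, hc] at h; omega
    · simp [rk, hc] at h
      obtain ⟨j, hj, rfl⟩ := h
      have := ih c j hj
      omega

lemma rk_none_iff : ∀ (P : List String) (c : String), rk P c = none ↔ c ∉ P := by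
  intro P
  induction P with
  | nil => intro c; simp [rk]
  | cons a t ih =>
    intro c
    by_cases hc : c = a
    · simp [rk, hc]
    · simp [rk, hc, ih]

lemma rk_inj : ∀ (P : List String) (p q : String) (i : Int),
    rk P p = some i → rk P q = some i → p = q := by
  intro P
  induction P with
  | nil => intro p q i h; simp [rk] at h
  | cons a t ih =>
    intro p q i hp hq
    by_cases hpa : p = a <;> by_cases hqa : q = a
    · exact hpa.trans hqa.symm
    · simp [rk, hpa, hqa] at hp hq
      obtain ⟨j, hj, hji⟩ := hq
      have := rk_nonneg t q j hj
      omega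
    · simp [rk, hpa, hqa] at hp hq
      obtain ⟨j, hj, hji⟩ := hp
      have := rk_nonneg t p j hj
      omega
    · simp [rk, hpa, hqa] at hp hq
      obtain ⟨j, hj, hji⟩ := hp
      obtain ⟨k, hk, hki⟩ := hq
      have : j = k := by omega
      exact ih p q j hj (this ▸ hk)

-- A's loop returns a priority code that is in `conditions` and has minimal rank among such codes
lemma find?_min : ∀ (P : List String) (pred : String → Bool) (p : String),
    P.find? pred = some p →
    pred p = true ∧ ∃ i, rk P p = some i ∧
      ∀ q j, pred q = true → rk P q = some j → i ≤ j := by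
  intro P
  induction P with
  | nil => intro pred p h; simp at h
  | cons a t ih =>
    intro pred p h
    by_cases ha : pred a = true
    · rw [List.find?_cons_of_pos ha] at h
      obtain rfl := Option.some.inj h
      refine ⟨ha, 0, by simp [rk], ?_⟩
      intro q j _ hj
      exact rk_nonneg _ q j hj
    · rw [List.find?_cons_of_neg (by simpa using ha)] at h
      obtain ⟨hp, i, hi, hmin⟩ := ih pred p h
      have hpa : p ≠ a := fun e => ha (e ▸ hp)
      refine ⟨hp, i + 1, by simp [rk, hpa, hi], ?_⟩
      intro q j hq hj
      have hqa : q ≠ a := fun e => ha (e ▸ hq)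
      simp [rk, hqa] at hj
      obtain ⟨k, hk, rfl⟩ := hj
      have := hmin q k hq hk
      omega

-- inserting pairs whose keys all differ from c does not change the lookup at c
lemma get?_foldl_insert_of_not_mem :
    ∀ (l : List (Int × String)) (d : PySem.Dict String Int) (c : String),
    (∀ p ∈ l, p.2 ≠ c) →
    (l.foldl (fun d p => d.insert p.2 p.1) d).get? c = d.get? c := by
  intro l
  induction l with
  | nil => intro d c _; rfl
  | cons x t ih =>
    intro d c h
    simp only [List.foldl_cons]
    rw [ih _ c (fun p hp => h p (List.mem_cons_of_mem _ hp))]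
    exact PySem.Dict.get?_insert_of_ne _ _ (Ne.symm (h x List.mem_cons_self))

-- the dict built from enumerate(P, s) looks up exactly s + rank
lemma build_get : ∀ (P : List String), P.Nodup → ∀ (s : Int) (d : PySem.Dict String Int) (c : String),
    ((PySem.List.enumerate P s).foldl (fun d p => d.insert p.2 p.1) d).get? c
      = match rk P c with
        | some i => some (s + i)
        | none => d.get? c := by
  intro P
  induction P with
  | nil => intro _ s d c; simp [PySem.List.enumerate_nil, rk]
  | cons a t ih =>
    intro hnd s d c
    rw [PySem.List.enumerate_cons]
    simp only [List.foldl_cons]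
    by_cases hc : c = a
    · subst hc
      have hct : c ∉ t := (List.nodup_cons.mp hnd).1
      rw [get?_foldl_insert_of_not_mem]
      · simp [rk, PySem.Dict.get?_insert_self]
      · intro p hp he
        rw [PySem.List.mem_enumerate_iff] at hp
        obtain ⟨k, hk, rfl⟩ := hp
        exact hct (he ▸ List.getElem_mem hk)
    · rw [ih (List.nodup_cons.mp hnd).2 (s + 1) _ c]
      cases hrk : rk t c with
      | some i => simp [rk, hc, hrk]; ring
      | none => simp [rk, hc, hrk, PySem.Dict.get?_insert_of_ne _ _ hc]

lemma priority_nodup : priorityList.Nodup := by decide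

-- bridge: the lookup B performs IS the rank in the priority list
lemma rank_get (c : String) : rankDict.get? c = rk priorityList c := by
  rw [rankDict.eq_def, build_get priorityList priority_nodup 0 PySem.Dict.empty c]
  cases h : rk priorityList c <;> simp [PySem.Dict.get?_empty]

-- invariant of B's fold: a `none` result means nothing in the list has a rank
lemma foldB_none : ∀ (cs : List String) (s : Option (String × Int)),
    cs.foldl bStep s = none → s = none ∧ ∀ c ∈ cs, rankDict.get? c = none := by
  intro cs
  induction cs with
  | nil => intro s h; simpa using h
  | cons c t ih =>
    intro s h
    simp only [List.foldl_cons] at h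
    obtain ⟨h1, h2⟩ := ih _ h
    cases hr : rankDict.get? c with
    | some r =>
      exfalso
      cases s <;> simp [bStep, hr] at h1
      split at h1 <;> simp at h1
    | none =>
      have hs : bStep s c = s := by simp [bStep, hr]
      rw [hs] at h1
      exact ⟨h1, fun x hx => by
        rcases List.mem_cons.mp hx with rfl | hx
        · exact hr
        · exact h2 x hx⟩

-- invariant of B's fold: a `some (b, r)` result is a member (or the start state) of minimal rank
lemma foldB_some : ∀ (cs : List String) (s : Option (String × Int)) (b : String) (r : Int),
    (∀ b0 r0, s = some (b0, r0) → rankDict.get? b0 = some r0) →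
    cs.foldl bStep s = some (b, r) →
    rankDict.get? b = some r ∧ (s = some (b, r) ∨ b ∈ cs) ∧
      (∀ c ∈ cs, ∀ r', rankDict.get? c = some r' → r ≤ r') ∧
      (∀ b0 r0, s = some (b0, r0) → r ≤ r0) := by
  intro cs
  induction cs with
  | nil =>
    intro s b r hs h
    simp only [List.foldl_nil] at h
    exact ⟨hs b r h, Or.inl h, by simp, fun b0 r0 h0 => by rw [h] at h0; cases h0; exact le_refl r⟩
  | cons c t ih =>
    intro s b r hs h
    simp only [List.foldl_cons] at h
    have hs' : ∀ b0 r0, bStep s c = some (b0, r0) → rankDict.get? b0 = some r0 := by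
      intro b0 r0 h0
      cases hr : rankDict.get? c with
      | none => simp only [bStep, hr] at h0; exact hs b0 r0 h0
      | some rc =>
        cases s with
        | none =>
          simp only [bStep, hr] at h0
          simp only [Option.some.injEq, Prod.mk.injEq] at h0
          obtain ⟨rfl, rfl⟩ := h0
          exact hr
        | some p =>
          obtain ⟨b1, r1⟩ := p
          simp only [bStep, hr] at h0
          by_cases hlt : rc < r1
          · rw [if_pos hlt] at h0
            simp only [Option.some.injEq, Prod.mk.injEq] at h0
            obtain ⟨rfl, rfl⟩ := h0
            exact hr
          · rw [if_neg hlt] at h0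
            exact hs b0 r0 h0
    obtain ⟨hb, hmem, hmin, hst⟩ := ih (bStep s c) b r hs' h
    refine ⟨hb, ?_, ?_, ?_⟩
    · rcases hmem with hse | hbt
      · cases hr : rankDict.get? c with
        | none => simp only [bStep, hr] at hse; exact Or.inl hse
        | some rc =>
          cases s with
          | none =>
            simp only [bStep, hr] at hse
            simp only [Option.some.injEq, Prod.mk.injEq] at hse
            exact Or.inr (List.mem_cons.mpr (Or.inl hse.1.symm))
          | some p =>
            obtain ⟨b1, r1⟩ := p
            simp only [bStep, hr] at hse
            by_cases hlt : rc < r1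
            · rw [if_pos hlt] at hse
              simp only [Option.some.injEq, Prod.mk.injEq] at hse
              exact Or.inr (List.mem_cons.mpr (Or.inl hse.1.symm))
            · rw [if_neg hlt] at hse
              exact Or.inl hse
      · exact Or.inr (List.mem_cons_of_mem _ hbt)
    · intro x hx r' hr'
      rcases List.mem_cons.mp hx with rfl | hxt
      · cases s with
        | none => exact hst x r' (by simp [bStep, hr'])
        | some p =>
          obtain ⟨b0, r0⟩ := p
          by_cases hlt : r' < r0
          · exact hst x r' (by simp [bStep, hr', hlt])
          · have := hst b0 r0 (by simp [bStep, hr', hlt])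
            omega
      · exact hmin x hxt r' hr'
    · intro b0 r0 h0
      subst h0
      cases hr : rankDict.get? c with
      | none => exact hst b0 r0 (by simp [bStep, hr])
      | some rc =>
        by_cases hlt : rc < r0
        · have := hst c rc (by simp [bStep, hr, hlt])
          omega
        · exact hst b0 r0 (by simp [bStep, hr, hlt])

-- ===== VERDICT (by name: the statement is the Claim_ definition above) =====
theorem get_primary_condition_spec : Claim_equal_get_primary_condition := by
  intro conds _
  unfold Spec_get_primary_condition get_primary_condition get_primary_condition_alt
  cases hF : conds.foldl bStep none with
  | none =>
    obtain ⟨-, h2⟩ := foldB_none conds none hF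
    have hfind : priorityList.find? (fun p => conds.contains p) = none := by
      rw [List.find?_eq_none]
      intro p hp
      simp only [decide_eq_false_iff_not, List.contains_eq_mem, Bool.not_eq_true]
      by_contra hc
      have hpc : p ∈ conds := by simpa using hc
      have := h2 p hpc
      rw [rank_get] at this
      exact (rk_none_iff priorityList p).mp this hp
    rw [hfind]
  | some br =>
    obtain ⟨b, r⟩ := br
    obtain ⟨hb, hmem, hmin, -⟩ := foldB_some conds none b r (by simp) hF
    have hbmem : b ∈ conds := by
      rcases hmem with h | h
      · simp at h
      · exact h
    have hrkb : rk priorityList b = some r := by rw [← rank_get]; exact hb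
    have hbP : b ∈ priorityList := by
      by_contra hc
      rw [← rk_none_iff priorityList b] at hc
      simp [hc] at hrkb
    cases hfind : priorityList.find? (fun p => conds.contains p) with
    | none =>
      rw [List.find?_eq_none] at hfind
      have := hfind b hbP
      simp [hbmem] at this
    | some p =>
      obtain ⟨hpred, i, hi, hminA⟩ := find?_min priorityList _ p hfind
      have hpc : p ∈ conds := by simpa using hpred
      have h1 : r ≤ i := hmin p hpc i (by rw [rank_get]; exact hi)
      have h2 : i ≤ r := hminA b r (by simpa using hbmem) hrkb
      have hir : i = r := le_antisymm h2 h1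
      have hpb : p = b := rk_inj priorityList p b i hi (hir ▸ hrkb)
      exact hpb
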